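-- pv_equiv track=rewrite | github.com/goldstargloww/isat-script-project | tools/shaky text generation things.py | wrap_in_spans
-- ===== SOURCE A (Python) =====
-- def wrap_in_spans(input: str):
--     output = ""
--     for character in input:
--         if character == " ":
--             output += " "
--         else:
--             output += "<span>" + character + "</span>"
--     return output
-- ===== SOURCE B (Python) =====
-- def wrap_in_spans(input: str):
--     segments = input.split(" ")
--     wrapped = ["".join("<span>" + c + "</span>" for c in seg) for seg in segments]
--     return " ".join(wrapped)
-- ===== Notes on version B (the rewrite author's own statement) =====
-- stated objective: alternative
-- what changed: Replaces the flat per-character loop with an if-branch by a two-level decomposition: split the string on single spaces, wrap every character of each segment, and rejoin the segments with spaces.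
import Mathlib
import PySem

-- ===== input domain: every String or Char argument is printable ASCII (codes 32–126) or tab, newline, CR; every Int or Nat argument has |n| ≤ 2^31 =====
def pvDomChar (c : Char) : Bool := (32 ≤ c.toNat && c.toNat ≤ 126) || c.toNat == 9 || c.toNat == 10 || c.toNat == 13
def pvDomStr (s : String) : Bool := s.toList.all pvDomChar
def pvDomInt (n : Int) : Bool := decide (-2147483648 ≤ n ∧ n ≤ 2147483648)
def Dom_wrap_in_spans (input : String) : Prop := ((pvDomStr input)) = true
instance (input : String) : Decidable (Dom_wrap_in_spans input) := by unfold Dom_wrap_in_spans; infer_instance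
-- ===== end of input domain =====

-- B replaces A's flat per-character loop by a split-on-space / wrap-each-segment / rejoin decomposition (alternative, same cost).


-- ===== PORT A =====
-- flat loop: output += " " for a space, output += "<span>" + c + "</span>" otherwise
def wrap_in_spans (input : String) : String :=
  String.mk (input.toList.foldl
    (fun output character =>
      if character = ' ' then output ++ [' ']
      else output ++ ("<span>".toList ++ [character] ++ "</span>".toList)) [])

-- ===== PORT B =====
-- "".join("<span>" + c + "</span>" for c in seg)
def pvWrapSeg (seg : List Char) : List Char :=
  seg.flatMap (fun c => "<span>".toList ++ [c] ++ "</span>".toList)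

def wrap_in_spans_alt (input : String) : String :=
  String.mk (PySem.Chars.join [' ']
    ((PySem.Chars.splitOn input.toList [' ']).map pvWrapSeg))

-- ===== PRECONDITION & SPEC =====
def Spec_wrap_in_spans (input : String) (out : String) : Prop := out = wrap_in_spans_alt input
instance (input : String) (out : String) : Decidable (Spec_wrap_in_spans input out) := by unfold Spec_wrap_in_spans; infer_instance

-- ===== CLAIM (what is proved, stated in full; the proofs are below) =====
def Claim_equal_wrap_in_spans : Prop := ∀ (input : String), Dom_wrap_in_spans input → Spec_wrap_in_spans input (wrap_in_spans input)

-- ===== LEMMAS AND PROOFS =====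

-- the per-character expansion both programs realize
def pvStep (c : Char) : List Char :=
  if c = ' ' then [' '] else "<span>".toList ++ [c] ++ "</span>".toList

-- A's loop appends pvStep of each character
theorem pv_foldl_eq_flatMap (cs : List Char) (acc : List Char) :
    cs.foldl (fun output character =>
      if character = ' ' then output ++ [' ']
      else output ++ ("<span>".toList ++ [character] ++ "</span>".toList)) acc
    = acc ++ cs.flatMap pvStep := by
  induction cs generalizing acc with
  | nil => simp
  | cons c cs ih =>
    simp only [List.foldl_cons, List.flatMap_cons, ih, pvStep]
    by_cases h : c = ' ' <;> simp [h]

-- PySem's fuel-based splitOn.go, characterized by Mathlib's List.splitOn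
theorem pv_splitOn_go (fuel : Nat) (l cur : List Char) (acc : List (List Char)) (h : l.length ≤ fuel) :
    PySem.Chars.splitOn.go [' '] fuel l cur acc
    = acc.reverse ++ (List.splitOn ' ' l).modifyHead (cur.reverse ++ ·) := by
  induction fuel generalizing l cur acc with
  | zero =>
    have : l = [] := List.length_eq_zero_iff.mp (Nat.le_zero.mp h)
    subst this
    simp [PySem.Chars.splitOn.go, List.splitOn, List.splitOnP_nil]
  | succ fuel ih =>
    cases l with
    | nil => simp [PySem.Chars.splitOn.go, List.splitOn, List.splitOnP_nil]
    | cons c rest =>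
      have hlen : rest.length ≤ fuel := by simpa using h
      by_cases hc : c = ' '
      · subst hc
        simp only [PySem.Chars.splitOn.go, List.isPrefixOf, beq_self_eq_true,
          Bool.true_and, List.isPrefixOf_nil_left, if_true,
          List.length_cons, List.length_nil, List.drop_succ_cons, List.drop_zero]
        rw [ih _ _ _ hlen]
        have hne := List.splitOnP_ne_nil (· == ' ') rest
        simp only [List.splitOn, List.splitOnP_cons, beq_self_eq_true, if_true]
        cases hsp : List.splitOnP (· == ' ') rest with
        | nil => exact absurd hsp hne
        | cons a t => simp
      · have hpre : ([' '].isPrefixOf (c :: rest)) = false := by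
          simp [List.isPrefixOf]
          exact fun h' => (hc h'.symm).elim
        simp only [PySem.Chars.splitOn.go, hpre, Bool.false_eq_true, if_false]
        rw [ih _ _ _ hlen]
        have hne := List.splitOnP_ne_nil (· == ' ') rest
        have hcb : (c == ' ') = false := by simpa using hc
        simp only [List.splitOn, List.splitOnP_cons, hcb, Bool.false_eq_true, if_false]
        cases hsp : List.splitOnP (· == ' ') rest with
        | nil => exact absurd hsp hne
        | cons a t => simp

theorem pv_splitOn_eq (cs : List Char) :
    PySem.Chars.splitOn cs [' '] = List.splitOn ' ' cs := by
  rw [PySem.Chars.splitOn, pv_splitOn_go _ _ _ _ (by omega)]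
  have hne := List.splitOnP_ne_nil (· == ' ') cs
  cases hsp : List.splitOnP (· == ' ') cs with
  | nil => exact absurd hsp hne
  | cons a t => simp [List.splitOn, hsp]

-- pulling a common prefix out of the first joined part
theorem pv_join_head_append (x y : List Char) (l : List (List Char)) :
    PySem.Chars.join [' '] ((x ++ y) :: l) = x ++ PySem.Chars.join [' '] (y :: l) := by
  cases l with
  | nil => simp [PySem.Chars.join, List.intercalate]
  | cons b t => simp [PySem.Chars.join, List.intercalate, List.append_assoc]

-- B's split/wrap/join equals the per-character expansion
theorem pv_join_split (cs : List Char) :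
    PySem.Chars.join [' '] ((List.splitOn ' ' cs).map pvWrapSeg) = cs.flatMap pvStep := by
  induction cs with
  | nil => simp [List.splitOn, List.splitOnP_nil, pvWrapSeg, PySem.Chars.join, List.intercalate]
  | cons c cs ih =>
    by_cases hc : c = ' '
    · subst hc
      simp only [List.splitOn, List.splitOnP_cons, beq_self_eq_true, if_true] at *
      have hne := List.splitOnP_ne_nil (· == ' ') cs
      cases hsp : List.splitOnP (· == ' ') cs with
      | nil => exact absurd hsp hne
      | cons a t =>
        rw [hsp] at ih
        simp only [List.map_cons] at ih
        simp only [List.map_cons, List.flatMap_cons]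
        rw [show pvWrapSeg [] = [] from rfl]
        have : PySem.Chars.join [' '] ([] :: pvWrapSeg a :: t.map pvWrapSeg)
            = [' '] ++ PySem.Chars.join [' '] (pvWrapSeg a :: t.map pvWrapSeg) := by
          simp [PySem.Chars.join, List.intercalate]
        rw [this, ih]
        simp [pvStep]
    · have hcb : (c == ' ') = false := by simpa using hc
      simp only [List.splitOn, List.splitOnP_cons, hcb, Bool.false_eq_true, if_false] at *
      have hne := List.splitOnP_ne_nil (· == ' ') cs
      cases hsp : List.splitOnP (· == ' ') cs with
      | nil => exact absurd hsp hne
      | cons a t =>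
        rw [hsp] at ih
        simp only [List.map_cons] at ih
        simp only [List.modifyHead_cons, List.map_cons, List.flatMap_cons]
        have : pvWrapSeg (c :: a) = ("<span>".toList ++ [c] ++ "</span>".toList) ++ pvWrapSeg a := by
          simp [pvWrapSeg]
        rw [this, pv_join_head_append, ih]
        simp [pvStep, hc]

-- ===== VERDICT (by name: the statement is the Claim_ definition above) =====
theorem wrap_in_spans_spec : Claim_equal_wrap_in_spans := by
  intro input _
  unfold Spec_wrap_in_spans wrap_in_spans wrap_in_spans_alt
  rw [pv_splitOn_eq, pv_join_split, pv_foldl_eq_flatMap]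
  simp
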